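-- pv_equiv track=rewrite | github.com/pshatov/AoC | 2020/18/18.py | extract_brackets
-- ===== SOURCE A (Python) =====
-- def extract_brackets(l):
--     i_start = 0
--     for i_stop in range(1, len(l)):
--         if l[i_stop] == ')':
--             a = '' if i_start == 0 else l[0:i_start]
--             b = l[i_start+1:i_stop]
--             c = '' if i_stop == len(l)-1 else l[i_stop+1:len(l)]
--             return a, b, c
--         elif l[i_stop] == '(':
--             i_start = i_stop
--     raise RuntimeError
-- ===== SOURCE B (Python) =====
-- def extract_brackets(l):
--     it = iter(l)
--     b = next(it, None)
--     if b is None: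
--         raise RuntimeError
--     a = None
--     for ch in it:
--         if ch == ')':
--             c = ''.join(it)
--             return ('', b[1:], c) if a is None else (a, b, c)
--         if ch == '(':
--             a = b if a is None else a + '(' + b
--             b = ''
--         else:
--             b += ch
--     raise RuntimeError
-- ===== Notes on version B (the rewrite author's own statement) =====
-- stated objective: alternative
-- what changed: A tracks integer indices (last '(' position) and slices the input at the end; B never slices by index: it consumes the string through an iterator, incrementally building the before-bracket and inside-bracket strings as accumulators (folding each char into them, merging on '('), and joins the leftover iterator for the tail.
import Mathlib
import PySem

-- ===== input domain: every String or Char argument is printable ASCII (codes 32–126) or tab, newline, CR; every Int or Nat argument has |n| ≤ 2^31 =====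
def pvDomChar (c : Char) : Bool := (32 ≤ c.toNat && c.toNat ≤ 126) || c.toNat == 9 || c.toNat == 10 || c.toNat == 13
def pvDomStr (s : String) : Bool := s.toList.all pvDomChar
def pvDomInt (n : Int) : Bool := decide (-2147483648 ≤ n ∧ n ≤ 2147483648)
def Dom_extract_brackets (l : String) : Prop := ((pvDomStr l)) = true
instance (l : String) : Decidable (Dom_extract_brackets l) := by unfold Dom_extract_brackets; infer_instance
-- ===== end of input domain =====

-- B replaces A's index-tracking loop plus final slicing with an iterator consumed once into
-- growing string accumulators (merged on '('); same O(n) traversal, a different decomposition.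

-- ===== PORT A =====
-- the loop 'for i_stop in range(1, len(l))' with carried state i_start; none = the final 'raise RuntimeError'
def extract_brackets_go (cs : List Char) (i_start : Nat) (i_stop : Nat) : Option (String × String × String) :=
  if h : i_stop < cs.length then
    if cs[i_stop] = ')' then
      some ((if i_start = 0 then "" else String.ofList (PySem.Chars.slice cs (some 0) (some (i_start : Int)))),
            String.ofList (PySem.Chars.slice cs (some ((i_start : Int) + 1)) (some (i_stop : Int))),
            (if i_stop = cs.length - 1 then "" else
              String.ofList (PySem.Chars.slice cs (some ((i_stop : Int) + 1)) (some (cs.length : Int)))))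
    else if cs[i_stop] = '(' then
      extract_brackets_go cs i_stop (i_stop + 1)
    else
      extract_brackets_go cs i_start (i_stop + 1)
  else none
termination_by cs.length - i_stop

def extract_brackets (l : String) : String × String × String :=
  (extract_brackets_go l.toList 0 1).getD ("", "", "")

-- ===== PORT B =====
-- Source B's for-loop over the iterator: a = text before the last '(' (none = no '(' seen yet),
-- b = chars accumulated since then; none = the 'raise RuntimeError' after the loop.
def extract_brackets_alt_go (a : Option (List Char)) (b : List Char) :
    List Char → Option (String × String × String)
  | [] => none
  | ch :: rest =>
      if ch = ')' then
        some (match a with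
          | none => ("", String.ofList b.tail, String.ofList rest)
          | some a => (String.ofList a, String.ofList b, String.ofList rest))
      else if ch = '(' then
        extract_brackets_alt_go (some (match a with | none => b | some a => a ++ '(' :: b)) [] rest
      else
        extract_brackets_alt_go a (b ++ [ch]) rest

-- 'b = next(it, None); if b is None: raise RuntimeError' then the loop over the rest
def extract_brackets_alt (l : String) : String × String × String :=
  match l.toList with
  | [] => ("", "", "")
  | c :: rest => (extract_brackets_alt_go none [c] rest).getD ("", "", "")

-- ===== PRECONDITION & SPEC =====
-- Pre_ excludes exactly the inputs with no ')' at an index ≥ 1, on which both A and B raise RuntimeError.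
def Pre_extract_brackets (l : String) : Prop := ')' ∈ l.toList.tail
instance (l : String) : Decidable (Pre_extract_brackets l) := by unfold Pre_extract_brackets; infer_instance
def pvWitness_extract_brackets : String := "2*(3+4)+5"
def Spec_extract_brackets (l : String) (out : String × String × String) : Prop := out = extract_brackets_alt l
instance (l : String) (out : String × String × String) : Decidable (Spec_extract_brackets l out) := by unfold Spec_extract_brackets; infer_instance

-- ===== CLAIM (what is proved, stated in full; the proofs are below) =====
def Claim_equal_extract_brackets : Prop := ∀ (l : String), Dom_extract_brackets l → Pre_extract_brackets l → Spec_extract_brackets l (extract_brackets l)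

-- ===== LEMMAS AND PROOFS =====

lemma alt_go_cons (a : Option (List Char)) (b : List Char) (ch : Char) (rest : List Char) :
    extract_brackets_alt_go a b (ch :: rest) =
      if ch = ')' then
        some (match a with
          | none => ("", String.ofList b.tail, String.ofList rest)
          | some a => (String.ofList a, String.ofList b, String.ofList rest))
      else if ch = '(' then
        extract_brackets_alt_go (some (match a with | none => b | some a => a ++ '(' :: b)) [] rest
      else
        extract_brackets_alt_go a (b ++ [ch]) rest := rfl

-- The loop correspondence: A's state (i_start, i_stop) versus B's accumulators (a, b).
lemma go_eq (cs : List Char) :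
    ∀ n i_stop i_start a b, cs.length - i_stop = n → 1 ≤ i_stop →
      ((i_start = 0 ∧ a = none ∧ b = cs.take i_stop) ∨
       (1 ≤ i_start ∧ i_start < i_stop ∧ cs[i_start]? = some '(' ∧
        a = some (cs.take i_start) ∧ b = (cs.drop (i_start + 1)).take (i_stop - (i_start + 1)))) →
      extract_brackets_go cs i_start i_stop = extract_brackets_alt_go a b (cs.drop i_stop) := by
  intro n
  induction n with
  | zero =>
    intro i_stop i_start a b hn h1 _hinv
    have hge : cs.length ≤ i_stop := by omega
    rw [extract_brackets_go, dif_neg (by omega), List.drop_eq_nil_of_le hge]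
    rfl
  | succ n ih =>
    intro i_stop i_start a b hn h1 hinv
    have hlt : i_stop < cs.length := by omega
    have hdrop : cs.drop i_stop = cs[i_stop] :: cs.drop (i_stop + 1) :=
      (List.getElem_cons_drop hlt).symm
    rw [extract_brackets_go, dif_pos hlt, hdrop, alt_go_cons]
    have e3 : (if i_stop = cs.length - 1 then "" else
        String.ofList (PySem.Chars.slice cs (some ((i_stop : Int) + 1)) (some (cs.length : Int)))) =
        String.ofList (List.drop (i_stop + 1) cs) := by
      by_cases hend : i_stop = cs.length - 1
      · rw [if_pos hend, List.drop_eq_nil_of_le (by omega)]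
      · rw [if_neg hend, PySem.Chars.slice_eq_listSlice,
          PySem.List.slice_toNat (xs := cs) (a := (i_stop : Int) + 1) (b := (cs.length : Int))
            (by omega) (by omega),
          show ((i_stop : Int) + 1).toNat = i_stop + 1 from by omega,
          show ((cs.length : Nat) : Int).toNat = cs.length from by omega,
          List.take_of_length_le (by simp)]
    by_cases hR : cs[i_stop] = ')'
    · rw [if_pos hR, if_pos hR]
      rcases hinv with ⟨h0, ha, hb⟩ | ⟨hs1, hslt, _hsopen, ha, hb⟩
      · subst h0 ha hb
        have htt : (List.take i_stop cs).tail = List.take (i_stop - 1) (List.drop 1 cs) := by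
          cases cs with
          | nil => simp
          | cons x xs =>
            cases i_stop with
            | zero => omega
            | succ m => simp
        have e2 : PySem.Chars.slice cs (some (((0 : Nat) : Int) + 1)) (some (i_stop : Int)) =
            (List.take i_stop cs).tail := by
          rw [PySem.Chars.slice_eq_listSlice,
            PySem.List.slice_toNat (xs := cs) (a := ((0 : Nat) : Int) + 1) (b := (i_stop : Int)) (by omega) (by omega),
            show (((0 : Nat) : Int) + 1).toNat = 1 from by omega, Int.toNat_natCast, htt]
        rw [if_pos rfl, e2, e3]
        try rfl
      · subst ha hb
        have hs0 : ¬ i_start = 0 := by omega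
        have e1 : PySem.Chars.slice cs (some 0) (some (i_start : Int)) = List.take i_start cs := by
          rw [PySem.Chars.slice_eq_listSlice,
            PySem.List.slice_toNat (xs := cs) (a := (0 : Int)) (b := (i_start : Int)) (by omega) (by omega),
            show ((0 : Int)).toNat = 0 from rfl, Int.toNat_natCast, List.drop_zero, Nat.sub_zero]
        have e2 : PySem.Chars.slice cs (some ((i_start : Int) + 1)) (some (i_stop : Int)) =
            List.take (i_stop - (i_start + 1)) (List.drop (i_start + 1) cs) := by
          rw [PySem.Chars.slice_eq_listSlice,
            PySem.List.slice_toNat (xs := cs) (a := (i_start : Int) + 1) (b := (i_stop : Int)) (by omega) (by omega),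
            show ((i_start : Int) + 1).toNat = i_start + 1 from by omega, Int.toNat_natCast]
        rw [if_neg hs0, e1, e2, e3]
        try rfl
    · rw [if_neg hR, if_neg hR]
      by_cases hO : cs[i_stop] = '('
      · rw [if_pos hO, if_pos hO]
        have hopen : cs[i_stop]? = some '(' := by
          rw [List.getElem?_eq_getElem hlt, hO]
        rcases hinv with ⟨h0, ha, hb⟩ | ⟨hs1, hslt, hsopen, ha, hb⟩
        · subst h0 ha hb
          apply ih (i_stop + 1) i_stop _ _ (by omega) (by omega)
          right
          exact ⟨by omega, by omega, hopen, rfl, by simp⟩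
        · subst ha hb
          have hmerge : List.take i_start cs ++
              '(' :: List.take (i_stop - (i_start + 1)) (List.drop (i_start + 1) cs) =
              List.take i_stop cs := by
            have hdrop2 : List.drop i_start cs = '(' :: List.drop (i_start + 1) cs := by
              have h3 := (List.getElem_cons_drop (show i_start < cs.length by omega)).symm
              rw [List.getElem?_eq_getElem (show i_start < cs.length by omega)] at hsopen
              simp at hsopen
              rw [h3, hsopen]
            have hsplit : List.take i_stop cs =
                List.take i_start cs ++ List.take (i_stop - i_start) (List.drop i_start cs) := by
              rw [← List.take_add]
              congr 1
              omega
            rw [hsplit, hdrop2, show i_stop - i_start = (i_stop - (i_start + 1)) + 1 from by omega,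
              List.take_succ_cons]
          apply ih (i_stop + 1) i_stop _ _ (by omega) (by omega)
          right
          exact ⟨by omega, by omega, hopen, congrArg some hmerge, by simp⟩
      · rw [if_neg hO, if_neg hO]
        have hget : ∀ m, m ≤ i_stop →
            List.take (i_stop - m) (List.drop m cs) ++ [cs[i_stop]] =
            List.take (i_stop + 1 - m) (List.drop m cs) := by
          intro m hm
          rw [show i_stop + 1 - m = (i_stop - m) + 1 from by omega, List.take_add_one]
          congr 1
          rw [List.getElem?_drop, show m + (i_stop - m) = i_stop from by omega,
            List.getElem?_eq_getElem hlt]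
          rfl
        rcases hinv with ⟨h0, ha, hb⟩ | ⟨hs1, hslt, hsopen, ha, hb⟩
        · subst h0 ha hb
          apply ih (i_stop + 1) 0 _ _ (by omega) (by omega)
          left
          refine ⟨rfl, rfl, ?_⟩
          have h4 := hget 0 (by omega)
          simp only [Nat.sub_zero, List.drop_zero] at h4
          exact h4
        · subst ha hb
          apply ih (i_stop + 1) i_start _ _ (by omega) (by omega)
          right
          exact ⟨hs1, by omega, hsopen, rfl, hget (i_start + 1) (by omega)⟩

-- ===== VERDICT (by name: the statement is the Claim_ definition above) =====
theorem extract_brackets_spec : Claim_equal_extract_brackets := by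
  intro l _hdom _hpre
  unfold Spec_extract_brackets extract_brackets extract_brackets_alt
  cases hcs : l.toList with
  | nil =>
    rw [extract_brackets_go, dif_neg (by simp)]
    rfl
  | cons c rest =>
    have hgo := go_eq (c :: rest) ((c :: rest).length - 1) 1 0 none [c] rfl (by omega)
      (Or.inl ⟨rfl, rfl, by simp⟩)
    simp only [List.drop_one, List.tail_cons] at hgo
    show (extract_brackets_go (c :: rest) 0 1).getD ("", "", "") =
      (extract_brackets_alt_go none [c] rest).getD ("", "", "")
    rw [hgo]
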